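-- pv_equiv track=rewrite | github.com/rageeb-hasan-shafee/Artificial-Intelligence | 3. Adversarial Search/2105175/frontend/chain_reaction_ui.py | get_critical_mass
-- ===== SOURCE A (Python) =====
-- ROWS = 9
--
-- COLS = 6
--
-- def get_critical_mass(row: int, col: int) -> int:
--     """Calculate critical mass for a cell based on its neighbors"""
--     neighbors = 0
--     directions = [(-1, 0), (1, 0), (0, -1), (0, 1)]
--
--     for dr, dc in directions:
--         nr, nc = row + dr, col + dc
--         if 0 <= nr < ROWS and 0 <= nc < COLS:
--             neighbors += 1
--
--     return neighbors
-- ===== SOURCE B (Python) =====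
-- ROWS = 9
--
-- COLS = 6
--
-- def get_critical_mass(row: int, col: int) -> int:
--     """Scan the clamped 3x3 window around the cell and count the grid cells
--     at Manhattan distance exactly 1."""
--     count = 0
--     for r in range(max(0, row - 1), min(ROWS, row + 2)):
--         for c in range(max(0, col - 1), min(COLS, col + 2)):
--             if abs(r - row) + abs(c - col) == 1:
--                 count += 1
--     return count
-- ===== Notes on version B (the rewrite author's own statement) =====
-- stated objective: alternative
-- what changed: Instead of offsetting the cell by four direction tuples and bounds-checking each candidate, B scans the 3x3 window clamped to the grid and counts the cells at Manhattan distance exactly 1.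
import Mathlib
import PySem

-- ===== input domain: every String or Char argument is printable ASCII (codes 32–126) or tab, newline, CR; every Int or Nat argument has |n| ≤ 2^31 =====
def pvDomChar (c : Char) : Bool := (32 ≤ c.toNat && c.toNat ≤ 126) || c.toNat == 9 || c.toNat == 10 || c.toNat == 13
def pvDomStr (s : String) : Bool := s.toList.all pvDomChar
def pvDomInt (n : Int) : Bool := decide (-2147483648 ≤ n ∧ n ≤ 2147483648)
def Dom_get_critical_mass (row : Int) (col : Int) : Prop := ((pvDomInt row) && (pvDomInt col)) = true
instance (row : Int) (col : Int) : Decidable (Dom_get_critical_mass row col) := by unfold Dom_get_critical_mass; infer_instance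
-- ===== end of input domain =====

-- B replaces the four-direction offset loop by a scan of the grid-clamped 3x3 window,
-- counting cells at Manhattan distance 1 (objective: alternative algorithm, same cost).

-- ===== PORT A =====
def pyDirections : List (Int × Int) := [(-1, 0), (1, 0), (0, -1), (0, 1)]

def get_critical_mass (row : Int) (col : Int) : Int :=
  pyDirections.foldl (fun neighbors d =>
    let nr := row + d.1
    let nc := col + d.2
    if 0 ≤ nr ∧ nr < 9 ∧ 0 ≤ nc ∧ nc < 6 then neighbors + 1 else neighbors) 0

-- ===== PORT B =====
-- window scan: fold over range(max(0,row-1), min(ROWS,row+2)) × range(max(0,col-1), min(COLS,col+2))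
def get_critical_mass_alt (row : Int) (col : Int) : Int :=
  (PySem.List.pyRange (max 0 (row - 1)) (min 9 (row + 2)) 1).foldl (fun count r =>
    (PySem.List.pyRange (max 0 (col - 1)) (min 6 (col + 2)) 1).foldl (fun count c =>
      if (r - row).natAbs + (c - col).natAbs = 1 then count + 1 else count) count) 0

-- ===== PRECONDITION & SPEC =====
def Spec_get_critical_mass (row : Int) (col : Int) (out : Int) : Prop := out = get_critical_mass_alt row col
instance (row : Int) (col : Int) (out : Int) : Decidable (Spec_get_critical_mass row col out) := by unfold Spec_get_critical_mass; infer_instance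

-- ===== CLAIM (what is proved, stated in full; the proofs are below) =====
def Claim_equal_get_critical_mass : Prop := ∀ (row : Int) (col : Int), Dom_get_critical_mass row col → Spec_get_critical_mass row col (get_critical_mass row col)

-- ===== LEMMAS AND PROOFS =====

lemma pyRange_one_nil {a b : Int} (h : b ≤ a) : PySem.List.pyRange a b 1 = [] := by
  rw [PySem.List.pyRange_one]
  have h0 : (b - a).toNat = 0 := by omega
  simp [h0]

lemma foldl_id (l : List Int) (a : Int) : l.foldl (fun a _ => a) a = a := by
  induction l generalizing a with
  | nil => rfl
  | cons x xs ih => simp [List.foldl, ih]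

-- ===== VERDICT (by name: the statement is the Claim_ definition above) =====
set_option maxHeartbeats 2000000 in
theorem get_critical_mass_spec : Claim_equal_get_critical_mass := by
  intro row col _
  unfold Spec_get_critical_mass get_critical_mass get_critical_mass_alt pyDirections
  by_cases hr : -1 ≤ row ∧ row ≤ 9
  · by_cases hc : -1 ≤ col ∧ col ≤ 6
    · obtain ⟨hr1, hr2⟩ := hr
      obtain ⟨hc1, hc2⟩ := hc
      interval_cases row <;> interval_cases col <;> decide
    · -- col range empty: inner fold leaves the accumulator unchanged
      have hcnil : PySem.List.pyRange (max 0 (col - 1)) (min 6 (col + 2)) 1 = [] :=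
        pyRange_one_nil (by omega)
      simp only [hcnil, List.foldl_nil, foldl_id, List.foldl]
      split_ifs <;> omega
  · -- row range empty: outer fold is over []
    have hrnil : PySem.List.pyRange (max 0 (row - 1)) (min 9 (row + 2)) 1 = [] :=
      pyRange_one_nil (by omega)
    simp only [hrnil, List.foldl_nil, List.foldl]
    split_ifs <;> omega
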